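-- pv_equiv track=rewrite | github.com/clararehmann/geans | scripts/go_terms_stats.py | stackparents
-- ===== SOURCE A (Python) =====
-- def getparents(gterm, go2parents_isa):
--     return go2parents_isa.get(gterm, [])
--
-- def stackparents(gterm, goparents):
--     parents = getparents(gterm, goparents)
--     stacked = []
--     stacked.extend(f"{p};{gterm}" for p in parents)
--     while parents:
--         stacked.extend(f"{p};{parent}" for parent in parents for p in getparents(parent, goparents))
--         parents = [p for parent in parents for p in getparents(parent, goparents)]
--     return stacked
-- ===== SOURCE B (Python) =====
-- def stackparents(gterm, goparents):
--     # single-queue BFS: pop one node at a time, emit its parent edges, enqueue the parents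
--     edges = []
--     queue = [gterm]
--     while queue:
--         node = queue.pop(0)
--         for p in goparents.get(node, []):
--             edges.append(f"{p};{node}")
--             queue.append(p)
--     return edges
-- ===== Notes on version B (the rewrite author's own statement) =====
-- stated objective: alternative
-- what changed: Replaced the level-by-level frontier BFS (which rebuilds the whole next level with nested comprehensions and extends the output a level at a time) by a single-queue BFS that pops one node at a time, emits its parent edges and enqueues the parents; FIFO order reproduces A's exact output, duplicates included.
import Mathlib
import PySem

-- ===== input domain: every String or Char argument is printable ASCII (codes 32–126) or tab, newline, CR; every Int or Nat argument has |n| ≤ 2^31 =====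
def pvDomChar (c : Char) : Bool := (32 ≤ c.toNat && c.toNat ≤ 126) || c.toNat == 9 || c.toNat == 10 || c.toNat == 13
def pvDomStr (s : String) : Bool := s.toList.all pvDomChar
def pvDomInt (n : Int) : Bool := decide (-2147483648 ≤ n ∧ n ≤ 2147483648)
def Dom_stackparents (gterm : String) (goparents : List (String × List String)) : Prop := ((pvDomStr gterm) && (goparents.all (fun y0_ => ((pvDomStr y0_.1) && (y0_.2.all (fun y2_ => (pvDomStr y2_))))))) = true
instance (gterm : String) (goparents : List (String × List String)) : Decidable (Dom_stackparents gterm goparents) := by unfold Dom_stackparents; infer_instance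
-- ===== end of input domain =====

-- B replaces A's level-by-level frontier BFS by a single-queue pop/emit/enqueue BFS (same output, duplicates and order included).
-- Equivalence is proved on acyclic parent graphs (Pre_); on a cycle reachable from gterm both Pythons loop forever.

-- ===== PORT A =====
-- go2parents_isa.get(gterm, []): first-match association-list lookup (the dict convention)
def getparentsL (gterm : String) (go2parents_isa : List (String × List String)) : List String :=
  match go2parents_isa with
  | [] => []
  | (k, v) :: rest => if k = gterm then v else getparentsL gterm rest

-- the 'while parents:' loop; fuel is only a totality guard (Pre_ guarantees the frontier dies within goparents.length + 2 levels)
def loopA (gp : List (String × List String)) (fuel : Nat) (parents stacked : List String) : List String :=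
  match fuel with
  | 0 => stacked
  | f + 1 =>
    if parents = [] then stacked
    else loopA gp f
      (parents.flatMap (fun parent => getparentsL parent gp))
      (stacked ++ parents.flatMap (fun parent => (getparentsL parent gp).map (fun p => p ++ ";" ++ parent)))

def stackparents (gterm : String) (goparents : List (String × List String)) : List String :=
  let parents := getparentsL gterm goparents
  let stacked : List String := []
  let stacked := stacked ++ parents.map (fun p => p ++ ";" ++ gterm)
  loopA goparents (goparents.length + 2) parents stacked

-- ===== PORT B =====
-- the body of B's 'for p in goparents.get(node, [])': append the edge, enqueue p (two accumulators: edges, queue-tail)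
def stepB (gp : List (String × List String)) (node : String) (st : List String × List String) : List String × List String :=
  (getparentsL node gp).foldl (fun acc p => (acc.1 ++ [p ++ ";" ++ node], acc.2 ++ [p])) st

-- the 'while queue:' loop: pop the front node, emit, enqueue; fuel is only a totality guard
def loopB (gp : List (String × List String)) (fuel : Nat) (queue edges : List String) : List String :=
  match fuel, queue with
  | _, [] => edges
  | 0, _ :: _ => edges
  | f + 1, node :: rest =>
    let r := stepB gp node (edges, rest)
    loopB gp f r.2 r.1

def stackparents_alt (gterm : String) (goparents : List (String × List String)) : List String :=
  let P := (goparents.map (fun kv => kv.2.length)).sum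
  loopB goparents ((P + 1) ^ (goparents.length + 3)) [gterm] []

-- ===== PRECONDITION & SPEC =====
-- one reachability-closure step: s together with the listed parents of every member of s (deduplicated)
def reachStep (gp : List (String × List String)) (s : List String) : List String :=
  (s ++ (gp.filter (fun kv => s.contains kv.1)).flatMap (fun kv => kv.2)).dedup

-- the nodes reachable from g (the iteration count is enough for the closure to saturate)
def reachableG (gp : List (String × List String)) (g : String) : List String :=
  (reachStep gp)^[gp.length + 4] [g]

-- Pre_ excludes exactly the inputs whose parent graph has a cycle reachable from gterm: there the Python A
-- (and B alike) loops forever and returns nothing.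
def Pre_stackparents (gterm : String) (goparents : List (String × List String)) : Prop :=
  ∀ kv ∈ goparents, kv.1 ∈ reachableG goparents gterm →
    kv.1 ∉ (reachStep goparents)^[goparents.length + 4] kv.2
instance (gterm : String) (goparents : List (String × List String)) : Decidable (Pre_stackparents gterm goparents) := by unfold Pre_stackparents; infer_instance

def pvWitness_stackparents : String × (List (String × List String)) :=
  ("GO:3", [("GO:3", ["GO:2", "GO:1"]), ("GO:2", ["GO:1"]), ("GO:1", [])])

def Spec_stackparents (gterm : String) (goparents : List (String × List String)) (out : List String) : Prop := out = stackparents_alt gterm goparents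
instance (gterm : String) (goparents : List (String × List String)) (out : List String) : Decidable (Spec_stackparents gterm goparents out) := by unfold Spec_stackparents; infer_instance

-- ===== CLAIM (what is proved, stated in full; the proofs are below) =====
def Claim_equal_stackparents : Prop := ∀ (gterm : String) (goparents : List (String × List String)), Dom_stackparents gterm goparents → Pre_stackparents gterm goparents → Spec_stackparents gterm goparents (stackparents gterm goparents)

-- ===== LEMMAS AND PROOFS =====

-- frontier step (one BFS level) and the edges a level emits
def frontF (gp : List (String × List String)) (s : List String) : List String :=
  s.flatMap (fun parent => getparentsL parent gp)
def emitE (gp : List (String × List String)) (s : List String) : List String :=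
  s.flatMap (fun parent => (getparentsL parent gp).map (fun p => p ++ ";" ++ parent))
-- number of queue pops B spends on the next m levels
def popS (gp : List (String × List String)) : Nat → List String → Nat
  | 0, _ => 0
  | m + 1, s => s.length + popS gp m (frontF gp s)

theorem stepB_eq (gp : List (String × List String)) (node : String) (st q : List String) :
    stepB gp node (st, q) =
      (st ++ (getparentsL node gp).map (fun p => p ++ ";" ++ node), q ++ getparentsL node gp) := by
  unfold stepB
  rw [PySem.List.foldl_prod_mk (f := fun acc p => acc ++ [p ++ ";" ++ node]) (g := fun acc p => acc ++ [p])]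
  rw [PySem.List.foldl_append_singleton_eq_map, PySem.List.foldl_append_singleton_eq_self]

-- B spends |xs| pops to process one whole level xs: afterwards the queue holds the next level
theorem loopB_level (gp : List (String × List String)) :
    ∀ (xs ys st : List String) (f : Nat),
      loopB gp (f + xs.length) (xs ++ ys) st = loopB gp f (ys ++ frontF gp xs) (st ++ emitE gp xs) := by
  intro xs
  induction xs with
  | nil => intro ys st f; simp [frontF, emitE]
  | cons x xs ih =>
    intro ys st f
    have hfu : f + (x :: xs).length = (f + xs.length) + 1 := by simp; omega
    rw [hfu, List.cons_append]
    show loopB gp ((f + xs.length) + 1) (x :: (xs ++ ys)) st = _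
    rw [loopB, stepB_eq]
    have := ih (ys ++ getparentsL x gp) (st ++ (getparentsL x gp).map (fun p => p ++ ";" ++ x)) f
    rw [← List.append_assoc] at this
    rw [this]
    simp [frontF, emitE, List.flatMap_cons]

-- A's level loop and B's queue loop agree when both have enough fuel for the m levels it takes the frontier to die
theorem loopAB (gp : List (String × List String)) :
    ∀ (m : Nat) (frontier st : List String) (fA fB : Nat),
      (frontF gp)^[m] frontier = [] → m ≤ fA → popS gp m frontier ≤ fB →
      loopA gp fA frontier st = loopB gp fB frontier st := by
  intro m
  induction m with
  | zero =>
    intro frontier st fA fB hit _ _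
    simp only [Function.iterate_zero_apply] at hit
    subst hit
    cases fA <;> simp [loopA, loopB]
  | succ m ih =>
    intro frontier st fA fB hit hfA hfB
    by_cases hfr : frontier = []
    · subst hfr; cases fA <;> simp [loopA, loopB]
    · obtain ⟨fA', rfl⟩ : ∃ k, fA = k + 1 := ⟨fA - 1, by omega⟩
      rw [loopA]
      simp only [hfr, if_false]
      have hpop : popS gp (m + 1) frontier = frontier.length + popS gp m (frontF gp frontier) := rfl
      obtain ⟨f, rfl⟩ : ∃ k, fB = k + frontier.length := ⟨fB - frontier.length, by omega⟩
      have hlv := loopB_level gp frontier [] st f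
      simp only [List.append_nil, List.nil_append] at hlv
      rw [hlv]
      have hit' : (frontF gp)^[m] (frontF gp frontier) = [] := by
        rw [← Function.iterate_succ_apply]; exact hit
      exact ih (frontF gp frontier) (st ++ emitE gp frontier) fA' f hit' (by omega) (by omega)

theorem getparentsL_len_le (gp : List (String × List String)) (x : String) :
    (getparentsL x gp).length ≤ (gp.map (fun kv => kv.2.length)).sum := by
  induction gp with
  | nil => simp [getparentsL]
  | cons kv rest ih =>
    obtain ⟨k, v⟩ := kv
    simp only [getparentsL, List.map_cons, List.sum_cons]
    split
    · omega
    · omega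

theorem frontF_len_le (gp : List (String × List String)) (s : List String) :
    (frontF gp s).length ≤ s.length * (gp.map (fun kv => kv.2.length)).sum := by
  induction s with
  | nil => simp [frontF]
  | cons x s ih =>
    have h1 := getparentsL_len_le gp x
    simp only [frontF, List.flatMap_cons, List.length_append, List.length_cons] at ih ⊢
    rw [Nat.succ_mul]
    omega

theorem popS_le (gp : List (String × List String)) :
    ∀ (m : Nat) (s : List String),
      popS gp m s ≤ s.length * ((gp.map (fun kv => kv.2.length)).sum + 1) ^ m := by
  intro m
  induction m with
  | zero => intro s; simp [popS]
  | succ m ih =>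
    intro s
    set P := (gp.map (fun kv => kv.2.length)).sum with hP
    have h1 := ih (frontF gp s)
    have h2 : (frontF gp s).length * (P + 1) ^ m ≤ (s.length * P) * (P + 1) ^ m :=
      Nat.mul_le_mul_right _ (frontF_len_le gp s)
    have h3 : 1 ≤ (P + 1) ^ m := Nat.one_le_pow _ _ (by omega)
    have h4 : popS gp (m + 1) s = s.length + popS gp m (frontF gp s) := rfl
    have h5 : s.length * (P + 1) ^ (m + 1) = s.length * (P + 1) ^ m + (s.length * P) * (P + 1) ^ m := by ring
    have h6 : s.length ≤ s.length * (P + 1) ^ m := Nat.le_mul_of_pos_right _ (by omega)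
    omega

-- a node with a nonempty parent list is a key of goparents
theorem mem_keys_of_parents_ne_nil (gp : List (String × List String)) (x : String)
    (h : getparentsL x gp ≠ []) : x ∈ gp.map Prod.fst := by
  induction gp with
  | nil => simp [getparentsL] at h
  | cons kv rest ih =>
    obtain ⟨k, v⟩ := kv
    simp only [getparentsL] at h
    by_cases hk : k = x
    · simp [hk]
    · simp only [if_neg hk] at h
      simp [ih h]

-- a parent chain: successive is-a edges
def ChainL (gp : List (String × List String)) : String → List String → Prop
  | _, [] => True
  | u, v :: l => v ∈ getparentsL u gp ∧ ChainL gp v l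

-- any member of the d-th frontier is the endpoint of a d-step parent chain from the initial frontier
theorem chain_of_mem_iterate (gp : List (String × List String)) :
    ∀ (d : Nat) (s : List String) (v : String), v ∈ (frontF gp)^[d] s →
      ∃ u ∈ s, ∃ l, ChainL gp u l ∧ l.length = d := by
  intro d
  induction d with
  | zero =>
    intro s v hv
    simp only [Function.iterate_zero_apply] at hv
    exact ⟨v, hv, [], trivial, rfl⟩
  | succ d ih =>
    intro s v hv
    rw [Function.iterate_succ_apply] at hv
    obtain ⟨u', hu', l, hch, hlen⟩ := ih (frontF gp s) v hv
    obtain ⟨u, hu, hpar⟩ := List.mem_flatMap.mp hu'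
    exact ⟨u, hu, u' :: l, ⟨hpar, hch⟩, by simp [hlen]⟩

-- every chain node except the last has a nonempty parent list, hence is a key
theorem chain_dropLast_keys (gp : List (String × List String)) :
    ∀ (l : List String) (u : String), ChainL gp u l →
      ∀ x ∈ (u :: l).dropLast, x ∈ gp.map Prod.fst := by
  intro l
  induction l with
  | nil => intro u _ x hx; simp at hx
  | cons v l ih =>
    intro u hch x hx
    obtain ⟨hv, hch'⟩ := hch
    rw [List.dropLast_cons₂] at hx
    rcases List.mem_cons.mp hx with h | h
    · subst h
      exact mem_keys_of_parents_ne_nil gp x (List.ne_nil_of_mem hv)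
    · exact ih v hch' x h

-- the first-match pair itself occurs in the association list
theorem getparentsL_pair_mem (gp : List (String × List String)) (x : String)
    (h : getparentsL x gp ≠ []) : (x, getparentsL x gp) ∈ gp := by
  induction gp with
  | nil => simp [getparentsL] at h
  | cons kv rest ih =>
    obtain ⟨k, v⟩ := kv
    simp only [getparentsL] at h ⊢
    by_cases hk : k = x
    · subst hk; simp
    · simp only [if_neg hk] at h ⊢
      exact List.mem_cons_of_mem _ (ih h)

theorem mem_reachStep (gp : List (String × List String)) (s : List String) (x : String) :
    x ∈ reachStep gp s ↔ x ∈ s ∨ ∃ kv ∈ gp, kv.1 ∈ s ∧ x ∈ kv.2 := by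
  simp only [reachStep, List.mem_dedup, List.mem_append, List.mem_flatMap, List.mem_filter,
    List.contains_iff_mem]
  constructor
  · rintro (hx | ⟨kv, ⟨hkv, hk⟩, hx⟩)
    · exact Or.inl hx
    · exact Or.inr ⟨kv, hkv, hk, hx⟩
  · rintro (hx | ⟨kv, hkv, hk, hx⟩)
    · exact Or.inl hx
    · exact Or.inr ⟨kv, ⟨hkv, hk⟩, hx⟩

theorem subset_reachStep (gp : List (String × List String)) (s : List String) : s ⊆ reachStep gp s := by
  intro x hx
  exact (mem_reachStep gp s x).mpr (Or.inl hx)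

theorem reachStep_mono (gp : List (String × List String)) {s t : List String} (h : s ⊆ t) :
    reachStep gp s ⊆ reachStep gp t := by
  intro x hx
  rw [mem_reachStep] at hx ⊢
  rcases hx with hx | ⟨kv, hkv, hk, hx⟩
  · exact Or.inl (h hx)
  · exact Or.inr ⟨kv, hkv, h hk, hx⟩

-- one real parent edge is one closure step
theorem getparents_subset_reachStep (gp : List (String × List String)) {s : List String} {v : String}
    (hv : v ∈ s) : getparentsL v gp ⊆ reachStep gp s := by
  intro y hy
  exact (mem_reachStep gp s y).mpr
    (Or.inr ⟨(v, getparentsL v gp), getparentsL_pair_mem gp v (List.ne_nil_of_mem hy), hv, hy⟩)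

theorem subset_iterate_reachStep (gp : List (String × List String)) :
    ∀ (m : Nat) (s : List String), s ⊆ (reachStep gp)^[m] s := by
  intro m
  induction m with
  | zero => intro s; simp
  | succ m ih =>
    intro s
    rw [Function.iterate_succ_apply]
    exact fun x hx => ih (reachStep gp s) (subset_reachStep gp s hx)

theorem iterate_reachStep_mono (gp : List (String × List String)) :
    ∀ (m : Nat) {s t : List String}, s ⊆ t → (reachStep gp)^[m] s ⊆ (reachStep gp)^[m] t := by
  intro m
  induction m with
  | zero => intro s t h; simpa using h
  | succ m ih =>
    intro s t h
    rw [Function.iterate_succ_apply, Function.iterate_succ_apply]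
    exact ih (reachStep_mono gp h)

-- every node on a chain of length ≤ m from u lies in the m-fold reachability closure of u's parents
theorem chain_mem_reach (gp : List (String × List String)) :
    ∀ (l : List String) (u x : String) (m : Nat), ChainL gp u l → x ∈ l → l.length ≤ m →
      x ∈ (reachStep gp)^[m] (getparentsL u gp) := by
  intro l
  induction l with
  | nil => intro u x m _ hx; simp at hx
  | cons v l ih =>
    intro u x m hch hx hm
    obtain ⟨hv, hch'⟩ := hch
    obtain ⟨m', rfl⟩ : ∃ k, m = k + 1 := ⟨m - 1, by simp at hm; omega⟩
    rcases List.mem_cons.mp hx with h | h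
    · subst h
      exact subset_iterate_reachStep gp _ _ hv
    · have hx' := ih v x m' hch' h (by simp at hm ⊢; omega)
      have hsub : getparentsL v gp ⊆ reachStep gp (getparentsL u gp) :=
        getparents_subset_reachStep gp hv
      rw [Function.iterate_succ_apply]
      exact iterate_reachStep_mono gp m' hsub hx'

-- a chain (inside a region R) that repeats a node yields a key in R that reaches itself
theorem cycle_of_dup_chain (gp : List (String × List String)) (N : Nat) (R : List String) :
    ∀ (l : List String) (u : String), l.length ≤ N → ChainL gp u l → (∀ x ∈ u :: l, x ∈ R) →
      ¬ (u :: l).Nodup →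
      ∃ kv ∈ gp, kv.1 ∈ R ∧ kv.1 ∈ (reachStep gp)^[N] kv.2 := by
  intro l
  induction l with
  | nil => intro u _ _ _ hnd; simp at hnd
  | cons v l ih =>
    intro u hlen hch hR hnd
    obtain ⟨hv, hch'⟩ := hch
    by_cases hu : u ∈ v :: l
    · refine ⟨(u, getparentsL u gp), getparentsL_pair_mem gp u (List.ne_nil_of_mem hv),
        hR u List.mem_cons_self, ?_⟩
      exact chain_mem_reach gp (v :: l) u u N ⟨hv, hch'⟩ hu hlen
    · have hnd' : ¬ (v :: l).Nodup := by
        intro hn; exact hnd (List.nodup_cons.mpr ⟨hu, hn⟩)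
      exact ih v (by simp at hlen ⊢; omega) hch' (fun x hx => hR x (List.mem_cons_of_mem _ hx)) hnd'

theorem frontier_dies (gterm : String) (gp : List (String × List String))
    (hpre : Pre_stackparents gterm gp) :
    (frontF gp)^[gp.length + 2] (getparentsL gterm gp) = [] := by
  by_contra hne
  obtain ⟨v, hv⟩ := List.exists_mem_of_ne_nil _ hne
  obtain ⟨u, hu, l, hch, hlen⟩ := chain_of_mem_iterate gp (gp.length + 2) (getparentsL gterm gp) v hv
  have hdl : ∀ x ∈ (u :: l).dropLast, x ∈ gp.map Prod.fst := chain_dropLast_keys gp l u hch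
  have hdllen : (u :: l).dropLast.length = gp.length + 2 := by
    simp [List.length_dropLast, hlen]
  have hnd : ¬ (u :: l).dropLast.Nodup := by
    intro hnodup
    have : (u :: l).dropLast.length ≤ (gp.map Prod.fst).length := by
      calc (u :: l).dropLast.length = (u :: l).dropLast.toFinset.card :=
            (List.toFinset_card_of_nodup hnodup).symm
        _ ≤ (gp.map Prod.fst).toFinset.card := Finset.card_le_card (by
            intro x hx
            rw [List.mem_toFinset] at hx ⊢
            exact hdl x hx)
        _ ≤ (gp.map Prod.fst).length := List.toFinset_card_le _
    simp [hdllen] at this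
  have hndfull : ¬ (u :: l).Nodup := fun hn => hnd (hn.sublist (List.dropLast_sublist _))
  -- every node of the offending chain is reachable from gterm
  have hRall : ∀ x ∈ u :: l, x ∈ reachableG gp gterm := by
    intro x hx
    have h1 : x ∈ (reachStep gp)^[gp.length + 3] (getparentsL gterm gp) :=
      chain_mem_reach gp (u :: l) gterm x (gp.length + 3) ⟨hu, hch⟩ hx (by simp [hlen])
    have h2 : getparentsL gterm gp ⊆ reachStep gp [gterm] :=
      getparents_subset_reachStep gp (List.mem_singleton.mpr rfl)
    have h3 := iterate_reachStep_mono gp (gp.length + 3) h2 h1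
    rw [← Function.iterate_succ_apply] at h3
    exact h3
  obtain ⟨kv, hkv, hkvR, hxr⟩ :=
    cycle_of_dup_chain gp (gp.length + 4) (reachableG gp gterm) l u (by omega) hch hRall hndfull
  exact hpre kv hkv hkvR hxr

-- ===== VERDICT (by name: the statement is the Claim_ definition above) =====
theorem stackparents_spec : Claim_equal_stackparents := by
  intro gterm gp _ hpre
  unfold Spec_stackparents
  have hA : stackparents gterm gp =
      loopA gp (gp.length + 2) (getparentsL gterm gp)
        ((getparentsL gterm gp).map (fun p => p ++ ";" ++ gterm)) := by
    simp [stackparents]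
  have hB : stackparents_alt gterm gp =
      loopB gp (((gp.map (fun kv => kv.2.length)).sum + 1) ^ (gp.length + 3)) [gterm] [] := rfl
  rw [hA, hB]
  set P := (gp.map (fun kv => kv.2.length)).sum with hP
  obtain ⟨f, hf⟩ : ∃ k, (P + 1) ^ (gp.length + 3) = k + 1 :=
    ⟨(P + 1) ^ (gp.length + 3) - 1, by have := Nat.one_le_pow (gp.length + 3) (P + 1) (by omega); omega⟩
  rw [hf, loopB, stepB_eq]
  simp only [List.nil_append]
  have hpops : popS gp (gp.length + 2) (getparentsL gterm gp) ≤ f := by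
    have h1 := popS_le gp (gp.length + 2) (getparentsL gterm gp)
    rw [← hP] at h1
    have h2 : (getparentsL gterm gp).length * (P + 1) ^ (gp.length + 2) ≤ P * (P + 1) ^ (gp.length + 2) :=
      Nat.mul_le_mul_right _ (getparentsL_len_le gp gterm)
    have h3 : (P + 1) ^ (gp.length + 3) = P * (P + 1) ^ (gp.length + 2) + (P + 1) ^ (gp.length + 2) := by ring
    have h4 : 1 ≤ (P + 1) ^ (gp.length + 2) := Nat.one_le_pow _ _ (by omega)
    omega
  exact loopAB gp (gp.length + 2) (getparentsL gterm gp) _ (gp.length + 2) f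
    (frontier_dies gterm gp hpre) (le_refl _) hpops
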